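-- pv_equiv track=rewrite | github.com/Papasalt/Project-Euler | P50 Consecutive Prime Sum/P50.py | P50
-- ===== SOURCE A (Python) =====
-- def createPrimes(lim):
--     prime_map = [0,0] + [1 for i in range(2, lim)]
--     i = 1
--     while i != lim:
--         if prime_map[i] != 0:
--             for j in range(2*i, lim, i):
--                 prime_map[j] = 0
--             i += 1
--         else:
--             i += 1
--     return prime_map
--
-- def P50(lim):
--     prime_map = createPrimes(lim)
--     primes = [p for p in range(0, len(prime_map)) if prime_map[p] != 0]
--     consec_primes = []
--     counts = []
--     for i in range(0, len(primes)-1):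
--         count = 0
--         p = i+2
--         total = primes[i]+primes[i+1]
--         while total < lim and p < len(primes):
--             if prime_map[total] == 1:
--                 counts.append(count)
--                 consec_primes.append(total)
--             count += 1
--             total += primes[p]
--             p += 1
--     return consec_primes, counts
-- ===== SOURCE B (Python) =====
-- def P50(lim):
--     # simple unconditional multiple-marking sieve (no primality guard), then
--     # prefix sums so consecutive sums are prefix differences instead of a running total
--     n = lim if lim > 2 else 2
--     is_p = [False, False] + [True] * (n - 2)
--     for d in range(2, n):
--         for j in range(2 * d, n, d):
--             is_p[j] = False
--     primes = [k for k in range(n) if is_p[k]]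
--     prefix = [0]
--     for p in primes:
--         prefix.append(prefix[-1] + p)
--     m = len(primes)
--     sums = []
--     counts = []
--     for i in range(m - 1):
--         for j in range(i + 2, m):
--             s = prefix[j] - prefix[i]
--             if s >= lim:
--                 break
--             if is_p[s]:
--                 sums.append(s)
--                 counts.append(j - i - 2)
--     return sums, counts
-- ===== Notes on version B (the rewrite author's own statement) =====
-- stated objective: alternative
-- what changed: B replaces A's guarded sieve-with-while-pointer by an unconditional multiple-marking sieve, and replaces the inner running-total/count/pointer state by a prefix-sum array so each consecutive sum is a prefix difference and the count is computed as j-i-2.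
import Mathlib
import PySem

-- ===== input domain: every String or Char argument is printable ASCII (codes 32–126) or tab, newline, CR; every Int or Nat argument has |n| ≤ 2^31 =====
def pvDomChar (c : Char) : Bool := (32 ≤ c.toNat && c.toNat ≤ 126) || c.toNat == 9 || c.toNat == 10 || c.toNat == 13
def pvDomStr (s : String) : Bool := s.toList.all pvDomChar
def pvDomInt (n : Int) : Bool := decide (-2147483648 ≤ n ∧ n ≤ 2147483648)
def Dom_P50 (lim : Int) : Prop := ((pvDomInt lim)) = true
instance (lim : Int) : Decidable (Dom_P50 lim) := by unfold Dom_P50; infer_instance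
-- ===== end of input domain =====

-- B replaces A's guarded sieve/while-pointer by an unconditional multiple-marking sieve and the
-- running total/count/pointer by a prefix-sum array (sums as prefix differences); objective: alternative.

-- ===== PORT A =====
-- inner marking loop of createPrimes: 'for j in range(2*i, lim, i): prime_map[j] = 0'
def pvMarkA (lim i : Int) (m : List Int) : List Int :=
  (PySem.List.pyRange (2*i) lim i).foldl (fun a j => PySem.List.pySetD a j 0) m

-- 'while i != lim: …' of createPrimes; fuel = number of remaining increments of i
def pvLoopA (lim : Int) : Nat → Int → List Int → List Int
  | 0, _, m => m
  | fuel+1, i, m =>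
    if i = lim then m
    else if PySem.List.pyGetD m i 0 ≠ 0 then pvLoopA lim fuel (i+1) (pvMarkA lim i m)
    else pvLoopA lim fuel (i+1) m

def pvCreatePrimes (lim : Int) : List Int :=
  pvLoopA lim (lim-1).toNat 1 ([0, 0] ++ (PySem.List.pyRange 2 lim 1).map (fun _ => 1))

-- 'while total < lim and p < len(primes): …' of P50; state (count, total, p, (consec_primes, counts))
def pvInnerA (lim : Int) (pm primes : List Int) : Nat → Int → Int → Int → List Int × List Int → List Int × List Int
  | 0, _, _, _, st => st
  | fuel+1, count, total, p, st =>
    if total < lim ∧ p < PySem.List.len primes then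
      let st' := if PySem.List.pyGetD pm total 0 = 1 then (st.1 ++ [total], st.2 ++ [count]) else st
      pvInnerA lim pm primes fuel (count+1) (total + PySem.List.pyGetD primes p 0) (p+1) st'
    else st

def P50 (lim : Int) : List Int × List Int :=
  let pm := pvCreatePrimes lim
  let primes := (PySem.List.pyRange 0 (PySem.List.len pm) 1).filter (fun p => decide (PySem.List.pyGetD pm p 0 ≠ 0))
  (PySem.List.pyRange 0 (PySem.List.len primes - 1) 1).foldl
    (fun st i =>
      pvInnerA lim pm primes ((PySem.List.len primes - (i+2)).toNat + 1) 0
        (PySem.List.pyGetD primes i 0 + PySem.List.pyGetD primes (i+1) 0) (i+2) st)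
    ([], [])

-- ===== PORT B =====
-- 'for j in range(2*d, n, d): is_p[j] = False'
def pvMarkB (n d : Int) (m : List Bool) : List Bool :=
  (PySem.List.pyRange (2*d) n d).foldl (fun a j => PySem.List.pySetD a j false) m

-- unconditional multiple-marking sieve: 'for d in range(2, n): mark multiples of d'
def pvSieveB (n : Int) : List Bool :=
  (PySem.List.pyRange 2 n 1).foldl (fun m d => pvMarkB n d m) ([false, false] ++ List.replicate (n-2).toNat true)

-- 'for j in range(i+2, m): s = prefix[j]-prefix[i]; if s >= lim: break; …'
def pvInnerB (lim m : Int) (isp : List Bool) (pre : List Int) (i : Int) : Nat → Int → List Int × List Int → List Int × List Int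
  | 0, _, st => st
  | fuel+1, j, st =>
    if j < m then
      let s := PySem.List.pyGetD pre j 0 - PySem.List.pyGetD pre i 0
      if lim ≤ s then st
      else if PySem.List.pyGetD isp s false then pvInnerB lim m isp pre i fuel (j+1) (st.1 ++ [s], st.2 ++ [j - i - 2])
      else pvInnerB lim m isp pre i fuel (j+1) st
    else st

def P50_alt (lim : Int) : List Int × List Int :=
  let n := if lim > 2 then lim else 2
  let isp := pvSieveB n
  let primes := (PySem.List.pyRange 0 n 1).filter (fun k => PySem.List.pyGetD isp k false)
  let pre := primes.foldl (fun pf p => pf ++ [PySem.List.pyGetD pf (-1) 0 + p]) [0]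
  let m := PySem.List.len primes
  (PySem.List.pyRange 0 (m - 1) 1).foldl
    (fun st i => pvInnerB lim m isp pre i ((m - (i+2)).toNat + 1) (i+2) st) ([], [])

-- ===== PRECONDITION & SPEC =====
-- Pre_: on nonpositive lim, A's while loop in createPrimes walks its index past the end of the tiny sieve list and raises IndexError, so those inputs are excluded.
def Pre_P50 (lim : Int) : Prop := 1 ≤ lim
instance (lim : Int) : Decidable (Pre_P50 lim) := by unfold Pre_P50; infer_instance
def pvWitness_P50 : Int := 30

def Spec_P50 (lim : Int) (out : List Int × List Int) : Prop := out = P50_alt lim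
instance (lim : Int) (out : List Int × List Int) : Decidable (Spec_P50 lim out) := by unfold Spec_P50; infer_instance

-- ===== CLAIM (what is proved, stated in full; the proofs are below) =====
def Claim_equal_P50 : Prop := ∀ (lim : Int), Dom_P50 lim → Pre_P50 lim → Spec_P50 lim (P50 lim)

-- ===== LEMMAS AND PROOFS =====

-- len(prime_map) = max 2 lim
def pvN (lim : Int) : Nat := if lim > 2 then lim.toNat else 2

-- 't has a nontrivial divisor d with 2 ≤ d ≤ k' (or is below 2): the zero-set of A's sieve after step k
def pvC (k t : Nat) : Prop := t < 2 ∨ ∃ d, 2 ≤ d ∧ d ≤ k ∧ d ∣ t ∧ d ≠ t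

def pvPrime (t : Nat) : Prop := 2 ≤ t ∧ ∀ d, 2 ≤ d → d < t → ¬ d ∣ t

-- pointwise value of A's sieve list after processing divisors up to k
def pvVal (m : List Int) (k t : Nat) : Prop :=
  (m.getD t 0 = 0 ↔ pvC k t) ∧ (m.getD t 0 = 0 ∨ m.getD t 0 = 1)

lemma pvFoldlSet_length {α : Type} (idx : List Int) (v : α) (m : List α) :
    (idx.foldl (fun a j => PySem.List.pySetD a j v) m).length = m.length := by
  induction idx generalizing m with
  | nil => rfl
  | cons j idx ih => simp [List.foldl_cons, ih, PySem.List.length_pySetD]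

-- setting a batch of nonnegative indices to v, read back at t
lemma pvFoldlSet_getD {α : Type} (idx : List Int) (hnn : ∀ j ∈ idx, 0 ≤ j) (v d : α) (m : List α)
    (t : Nat) (ht : t < m.length) :
    (idx.foldl (fun a j => PySem.List.pySetD a j v) m).getD t d =
      if (t : Int) ∈ idx then v else m.getD t d := by
  induction idx generalizing m with
  | nil => simp
  | cons j idx ih =>
    have hj : 0 ≤ j := hnn j (by simp)
    have hs : PySem.List.pySetD m j v = m.set j.toNat v := PySem.List.pySetD_of_nonneg m v hj
    have hlen : t < (m.set j.toNat v).length := by simpa using ht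
    rw [List.foldl_cons, hs, ih (fun x hx => hnn x (by simp [hx])) _ hlen]
    by_cases hje : (t : Int) = j
    · have : j.toNat = t := by omega
      subst this
      simp [List.getD_eq_getElem?_getD, ht, hje]
    · have hne : j.toNat ≠ t := by omega
      simp [List.getD_eq_getElem?_getD, hne, hje]

lemma pvMarkA_getD (lim i : Int) (hi : 0 < i) (m : List Int) (t : Nat) (ht : t < m.length) :
    (pvMarkA lim i m).getD t 0 =
      if i ∣ (t:Int) ∧ 2*i ≤ (t:Int) ∧ (t:Int) < lim then 0 else m.getD t 0 := by
  unfold pvMarkA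
  rw [pvFoldlSet_getD _ (fun j hj => by
        rw [PySem.List.mem_pyRange_iff_of_pos hi] at hj; omega) 0 0 m t ht]
  by_cases hc : i ∣ (t:Int) ∧ 2*i ≤ (t:Int) ∧ (t:Int) < lim
  · rw [if_pos, if_pos hc]
    rw [PySem.List.mem_pyRange_iff_of_pos hi]
    exact ⟨hc.2.1, hc.2.2, Dvd.dvd.sub hc.1 (Dvd.intro 2 (mul_comm i 2))⟩
  · rw [if_neg, if_neg hc]
    rw [PySem.List.mem_pyRange_iff_of_pos hi]
    rintro ⟨h1, h2, h3⟩
    refine hc ⟨?_, h1, h2⟩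
    have h4 : i ∣ ((t:Int) - 2*i) + 2*i := Dvd.dvd.add h3 (Dvd.intro 2 (mul_comm i 2))
    simpa using h4

lemma pvDvd_cases {d t : Nat} (hd : 1 ≤ d) (hdvd : d ∣ t) (hne : d ≠ t) : t = 0 ∨ 2*d ≤ t := by
  rcases hdvd with ⟨q, rfl⟩
  match q with
  | 0 => left; simp
  | 1 => omega
  | (q+2) => right; nlinarith

lemma pvC_step_mark (iN : Nat) (h2 : 2 ≤ iN) (t : Nat) :
    pvC iN t ↔ pvC (iN-1) t ∨ (iN ∣ t ∧ 2*iN ≤ t) := by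
  unfold pvC
  constructor
  · rintro (h | ⟨d, hd2, hdk, hdvd, hne⟩)
    · exact Or.inl (Or.inl h)
    · by_cases hdi : d = iN
      · subst hdi
        rcases pvDvd_cases (by omega) hdvd hne with h0 | h0
        · exact Or.inl (Or.inl (by omega))
        · exact Or.inr ⟨hdvd, h0⟩
      · exact Or.inl (Or.inr ⟨d, hd2, by omega, hdvd, hne⟩)
  · rintro ((h | ⟨d, hd2, hdk, hdvd, hne⟩) | ⟨hdvd, hle⟩)
    · exact Or.inl h
    · exact Or.inr ⟨d, hd2, by omega, hdvd, hne⟩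
    · exact Or.inr ⟨iN, h2, le_refl _, hdvd, by omega⟩

lemma pvC_step_skip (iN : Nat) (hge : 1 ≤ iN) (hC : pvC (iN-1) iN) (t : Nat) :
    pvC iN t ↔ pvC (iN-1) t := by
  unfold pvC
  constructor
  · rintro (h | ⟨d, hd2, hdk, hdvd, hne⟩)
    · exact Or.inl h
    · by_cases hdi : d = iN
      · subst hdi
        rcases hC with h | ⟨d', hd2', hdk', hdvd', hne'⟩
        · omega
        · refine Or.inr ⟨d', hd2', hdk', dvd_trans hdvd' hdvd, ?_⟩
          intro he
          subst he
          exact hne (Nat.dvd_antisymm hdvd hdvd')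
      · exact Or.inr ⟨d, hd2, by omega, hdvd, hne⟩
  · rintro (h | ⟨d, hd2, hdk, hdvd, hne⟩)
    · exact Or.inl h
    · exact Or.inr ⟨d, hd2, by omega, hdvd, hne⟩

lemma pvLim_le_N (lim : Int) (hlim : 1 ≤ lim) : lim ≤ ((pvN lim : Nat) : Int) := by
  unfold pvN; split_ifs <;> omega

lemma pvLoopA_char (lim : Int) (hlim : 1 ≤ lim) :
    ∀ (fuel : Nat) (i : Int) (m : List Int), 1 ≤ i → i + fuel = lim →
      m.length = pvN lim → (∀ t, t < pvN lim → pvVal m (i.toNat - 1) t) →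
      (pvLoopA lim fuel i m).length = pvN lim ∧
        ∀ t, t < pvN lim → pvVal (pvLoopA lim fuel i m) (lim.toNat - 1) t := by
  intro fuel
  induction fuel with
  | zero =>
    intro i m h1 h2 hlen hval
    have hi : i = lim := by omega
    subst hi
    exact ⟨hlen, by simpa [pvLoopA] using hval⟩
  | succ fuel ih =>
    intro i m h1 h2 hlen hval
    have hne : i ≠ lim := by omega
    have hiN : i.toNat < pvN lim := by
      have := pvLim_le_N lim hlim; omega
    have hget : PySem.List.pyGetD m i 0 = m.getD i.toNat 0 := by
      rw [PySem.List.pyGetD_eq_getElem m 0 (by omega) (by rw [hlen]; exact_mod_cast by omega : i < (m.length:Int))]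
      exact (List.getD_eq_getElem m 0 (by omega)).symm
    have hvi := hval i.toNat hiN
    rw [show pvLoopA lim (fuel+1) i m
        = if PySem.List.pyGetD m i 0 ≠ 0 then pvLoopA lim fuel (i+1) (pvMarkA lim i m)
          else pvLoopA lim fuel (i+1) m from by simp [pvLoopA, hne]]
    by_cases hmi : PySem.List.pyGetD m i 0 ≠ 0
    · rw [if_pos hmi]
      rw [hget] at hmi
      have hnC : ¬ pvC (i.toNat - 1) i.toNat := fun hC => hmi (hvi.1.2 hC)
      have h2i : 2 ≤ i.toNat := by
        by_contra hlt
        exact hnC (Or.inl (by omega))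
      refine ih (i+1) (pvMarkA lim i m) (by omega) (by omega)
        (by rw [pvMarkA]; rw [pvFoldlSet_length]; exact hlen) ?_
      intro t ht
      have hmg := pvMarkA_getD lim i (by omega) m t (by omega)
      have hcond : (i ∣ (t:Int) ∧ 2*i ≤ (t:Int) ∧ (t:Int) < lim) ↔ (i.toNat ∣ t ∧ 2*i.toNat ≤ t) := by
        have hic : i = ((i.toNat : Nat) : Int) := by omega
        constructor
        · rintro ⟨hd, hle, _⟩
          refine ⟨?_, by omega⟩
          rw [hic] at hd; exact_mod_cast hd
        · rintro ⟨hd, hle⟩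
          have htlim : (t:Int) < lim := by
            have h4 : 4 ≤ t := by omega
            have : lim > 2 := by
              by_contra hc
              have : pvN lim = 2 := by unfold pvN; simp [hc]
              omega
            have : pvN lim = lim.toNat := by unfold pvN; simp [this]
            omega
          exact ⟨by rw [hic]; exact_mod_cast hd, by omega, htlim⟩
      have hkk : (i+1).toNat - 1 = i.toNat := by omega
      rw [hkk]
      have hvt := hval t ht
      constructor
      · rw [hmg]
        by_cases hc : i ∣ (t:Int) ∧ 2*i ≤ (t:Int) ∧ (t:Int) < lim
        · rw [if_pos hc]
          simp only [true_iff]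
          rw [pvC_step_mark i.toNat h2i t]
          exact Or.inr (hcond.1 hc)
        · rw [if_neg hc]
          rw [pvC_step_mark i.toNat h2i t]
          constructor
          · intro h0; exact Or.inl (hvt.1.1 h0)
          · rintro (h0 | h0)
            · exact hvt.1.2 h0
            · exact absurd (hcond.2 h0) hc
      · rw [hmg]
        by_cases hc : i ∣ (t:Int) ∧ 2*i ≤ (t:Int) ∧ (t:Int) < lim
        · rw [if_pos hc]; exact Or.inl rfl
        · rw [if_neg hc]; exact hvt.2
    · rw [if_neg hmi]
      push_neg at hmi
      rw [hget] at hmi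
      have hC : pvC (i.toNat - 1) i.toNat := hvi.1.1 hmi
      refine ih (i+1) m (by omega) (by omega) hlen ?_
      intro t ht
      have hkk : (i+1).toNat - 1 = i.toNat := by omega
      rw [hkk]
      have hvt := hval t ht
      exact ⟨by rw [hvt.1]; exact (pvC_step_skip i.toNat (by omega) hC t).symm, hvt.2⟩

lemma pvInit_getD (lim : Int) (t : Nat) :
    ([0, 0] ++ (PySem.List.pyRange 2 lim 1).map (fun _ => (1:Int))).getD t 0
      = if 2 ≤ t ∧ t < pvN lim then 1 else 0 := by
  have hmap : (PySem.List.pyRange 2 lim 1).map (fun _ => (1:Int)) = List.replicate (lim-2).toNat 1 := by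
    rw [PySem.List.pyRange_one]
    rw [List.map_map]
    exact List.eq_replicate_iff.mpr ⟨by simp, by simp⟩
  rw [hmap]
  match t with
  | 0 => simp
  | 1 => simp
  | (t+2) =>
    rw [show ([0,0] : List Int) ++ List.replicate (lim-2).toNat 1 = [0] ++ ([0] ++ List.replicate (lim-2).toNat 1) from by simp]
    by_cases ht : t < (lim-2).toNat
    · rw [if_pos (by unfold pvN; split_ifs <;> omega)]
      simp [List.getD_eq_getElem?_getD, List.getElem?_replicate, ht]
    · rw [if_neg (by unfold pvN; split_ifs <;> omega)]
      simp [List.getD_eq_getElem?_getD, List.getElem?_replicate, ht]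

lemma pvInitLen (lim : Int) (h : 1 ≤ lim) :
    ([0, 0] ++ (PySem.List.pyRange 2 lim 1).map (fun _ => (1:Int))).length = pvN lim := by
  simp [PySem.List.length_pyRange_one]
  unfold pvN; split_ifs <;> omega

lemma pvC_final (lim : Int) (h : 1 ≤ lim) (t : Nat) (ht : t < pvN lim) :
    pvC (lim.toNat - 1) t ↔ ¬ pvPrime t := by
  unfold pvC pvPrime
  constructor
  · rintro (h0 | ⟨d, hd2, hdk, hdvd, hne⟩)
    · omega
    · intro ⟨ht2, hnd⟩
      have hdt : d ≤ t := Nat.le_of_dvd (by omega) hdvd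
      exact hnd d hd2 (by omega) hdvd
  · intro hn
    by_cases ht2 : 2 ≤ t
    · push_neg at hn
      obtain ⟨d, hd2, hdt, hdvd⟩ := hn ht2
      refine Or.inr ⟨d, hd2, ?_, hdvd, by omega⟩
      have hNl : pvN lim = lim.toNat := by
        unfold pvN; split_ifs with hh
        · rfl
        · unfold pvN at ht; simp [hh] at ht; omega
      omega
    · exact Or.inl (by omega)

lemma pvCreatePrimes_char (lim : Int) (hlim : 1 ≤ lim) :
    (pvCreatePrimes lim).length = pvN lim ∧
      ∀ t, t < pvN lim →
        (((pvCreatePrimes lim).getD t 0 = 1 ↔ pvPrime t) ∧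
         ((pvCreatePrimes lim).getD t 0 = 0 ∨ (pvCreatePrimes lim).getD t 0 = 1)) := by
  have hmain := pvLoopA_char lim hlim (lim-1).toNat 1
    ([0, 0] ++ (PySem.List.pyRange 2 lim 1).map (fun _ => 1))
    (by omega) (by omega) (pvInitLen lim hlim) ?_
  · refine ⟨hmain.1, fun t ht => ?_⟩
    have hv := hmain.2 t ht
    have hfin := pvC_final lim hlim t ht
    unfold pvCreatePrimes
    constructor
    · constructor
      · intro h1
        by_contra hp
        have : pvC (lim.toNat - 1) t := hfin.2 hp
        have := hv.1.2 this
        omega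
      · intro hp
        rcases hv.2 with h0 | h0
        · exact absurd (hfin.1 (hv.1.1 h0)) (by simpa using hp)
        · exact h0
    · exact hv.2
  · intro t ht
    unfold pvVal
    rw [pvInit_getD]
    constructor
    · constructor
      · intro h0
        split_ifs at h0 with hc
        · omega
        · exact Or.inl (by omega)
      · intro hC
        rcases hC with h0 | ⟨d, hd2, hdk, _, _⟩
        · rw [if_neg (by omega)]
        · omega
    · split_ifs <;> simp

lemma pvMarkB_getD (n d : Int) (hd : 0 < d) (m : List Bool) (t : Nat) (ht : t < m.length) :
    (pvMarkB n d m).getD t false =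
      if d ∣ (t:Int) ∧ 2*d ≤ (t:Int) ∧ (t:Int) < n then false else m.getD t false := by
  unfold pvMarkB
  rw [pvFoldlSet_getD _ (fun j hj => by
        rw [PySem.List.mem_pyRange_iff_of_pos hd] at hj; omega) false false m t ht]
  by_cases hc : d ∣ (t:Int) ∧ 2*d ≤ (t:Int) ∧ (t:Int) < n
  · rw [if_pos, if_pos hc]
    rw [PySem.List.mem_pyRange_iff_of_pos hd]
    exact ⟨hc.2.1, hc.2.2, Dvd.dvd.sub hc.1 (Dvd.intro 2 (mul_comm d 2))⟩
  · rw [if_neg, if_neg hc]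
    rw [PySem.List.mem_pyRange_iff_of_pos hd]
    rintro ⟨h1, h2, h3⟩
    refine hc ⟨?_, h1, h2⟩
    have h4 : d ∣ ((t:Int) - 2*d) + 2*d := Dvd.dvd.add h3 (Dvd.intro 2 (mul_comm d 2))
    simpa using h4

lemma pvSieveB_loop (n : Int) (hn : 2 ≤ n) :
    ∀ (e : Int), 2 ≤ e → e ≤ n →
      (((PySem.List.pyRange 2 e 1).foldl (fun m d => pvMarkB n d m)
          ([false, false] ++ List.replicate (n-2).toNat true)).length = n.toNat ∧
       ∀ t, t < n.toNat →
        (((PySem.List.pyRange 2 e 1).foldl (fun m d => pvMarkB n d m)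
            ([false, false] ++ List.replicate (n-2).toNat true)).getD t false = true ↔
          (2 ≤ t ∧ ¬ ∃ dN : Nat, 2 ≤ dN ∧ (dN:Int) < e ∧ dN ∣ t ∧ 2*dN ≤ t))) := by
  intro e he
  induction e, he using Int.le_induction with
  | base =>
    intro _
    rw [PySem.List.pyRange_one_eq_nil (by omega)]
    constructor
    · simp; omega
    · intro t ht
      simp only [List.foldl_nil]
      constructor
      · intro hg
        refine ⟨?_, ?_⟩
        · by_contra h2
          interval_cases t <;> simp_all
        · rintro ⟨dN, hd2, hdlt, _, _⟩; omega
      · rintro ⟨h2t, _⟩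
        match t, h2t with
        | (t+2), _ =>
          have : t < (n-2).toNat := by omega
          simp [List.getD_eq_getElem?_getD, List.getElem?_append_right, List.getElem?_replicate, this]
  | succ e he ih =>
    intro hen
    have ihh := ih (by omega)
    rw [PySem.List.pyRange_one_succ_right (by omega), List.foldl_append]
    constructor
    · simp only [List.foldl_cons, List.foldl_nil]
      rw [pvMarkB]; rw [pvFoldlSet_length]; exact ihh.1
    · intro t ht
      simp only [List.foldl_cons, List.foldl_nil]
      rw [pvMarkB_getD n e (by omega) _ t (by rw [ihh.1]; exact ht)]
      have hiff := ihh.2 t ht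
      by_cases hc : e ∣ (t:Int) ∧ 2*e ≤ (t:Int) ∧ (t:Int) < n
      · rw [if_pos hc]
        simp only [Bool.false_eq_true, false_iff]
        rintro ⟨h2t, hnex⟩
        have hdvdN : e.toNat ∣ t := by
          have he2 : e = ((e.toNat : Nat) : Int) := by omega
          have : ((e.toNat : Nat) : Int) ∣ (t:Int) := by rw [← he2]; exact hc.1
          exact_mod_cast this
        exact hnex ⟨e.toNat, by omega, by omega, hdvdN, by omega⟩
      · rw [if_neg hc]
        rw [hiff]
        constructor
        · rintro ⟨h2t, hnex⟩
          refine ⟨h2t, ?_⟩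
          rintro ⟨dN, hd2, hdlt, hdvd, hdle⟩
          by_cases hde : (dN : Int) = e
          · have h1 : e ∣ (t:Int) := by rw [← hde]; exact_mod_cast hdvd
            exact hc ⟨h1, by omega, by omega⟩
          · exact hnex ⟨dN, hd2, by omega, hdvd, hdle⟩
        · rintro ⟨h2t, hnex⟩
          exact ⟨h2t, fun ⟨dN, hd2, hdlt, hdvd, hdle⟩ => hnex ⟨dN, hd2, by omega, hdvd, hdle⟩⟩

lemma pvSieveB_char (lim : Int) (hlim : 1 ≤ lim) :
    (pvSieveB (if lim > 2 then lim else 2)).length = pvN lim ∧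
      ∀ t, t < pvN lim → ((pvSieveB (if lim > 2 then lim else 2)).getD t false = true ↔ pvPrime t) := by
  set n := if lim > 2 then lim else 2 with hn
  have hn2 : 2 ≤ n := by rw [hn]; split_ifs <;> omega
  have hNn : n.toNat = pvN lim := by unfold pvN; rw [hn]; split_ifs <;> simp
  have hloop := pvSieveB_loop n hn2 n (by omega) (le_refl n)
  unfold pvSieveB
  refine ⟨by rw [hloop.1, hNn], fun t ht => ?_⟩
  rw [hloop.2 t (by omega)]
  unfold pvPrime
  constructor
  · rintro ⟨h2t, hnex⟩
    refine ⟨h2t, fun d hd2 hdt hdvd => ?_⟩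
    rcases pvDvd_cases (by omega) hdvd (by omega) with h0 | h0
    · omega
    · exact hnex ⟨d, hd2, by omega, hdvd, h0⟩
  · rintro ⟨h2t, hnd⟩
    refine ⟨h2t, ?_⟩
    rintro ⟨dN, hd2, hdlt, hdvd, hdle⟩
    exact hnd dN hd2 (by omega) hdvd

lemma pvPyGetD_getD {α : Type} (xs : List α) (d : α) (x : Int) (h0 : 0 ≤ x) (h1 : x < (xs.length:Int)) :
    PySem.List.pyGetD xs x d = xs.getD x.toNat d := by
  rw [PySem.List.pyGetD_eq_getElem xs d h0 h1]
  exact (List.getD_eq_getElem xs d (by omega)).symm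

lemma pvPrimes_eq (lim : Int) (hlim : 1 ≤ lim) :
    (PySem.List.pyRange 0 (PySem.List.len (pvCreatePrimes lim)) 1).filter
        (fun p => decide (PySem.List.pyGetD (pvCreatePrimes lim) p 0 ≠ 0)) =
      (PySem.List.pyRange 0 (if lim > 2 then lim else 2) 1).filter
        (fun k => PySem.List.pyGetD (pvSieveB (if lim > 2 then lim else 2)) k false) := by
  have hA := pvCreatePrimes_char lim hlim
  have hB := pvSieveB_char lim hlim
  have hlen : PySem.List.len (pvCreatePrimes lim) = ((pvN lim : Nat) : Int) := by
    rw [PySem.List.len_eq, hA.1]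
  have hn : (if lim > 2 then lim else 2) = ((pvN lim : Nat) : Int) := by
    unfold pvN; split_ifs <;> omega
  simp only [hn] at hB ⊢
  rw [hlen]
  apply List.filter_congr
  intro x hx
  rw [PySem.List.mem_pyRange_one] at hx
  have hxN : x.toNat < pvN lim := by omega
  rw [pvPyGetD_getD _ 0 x hx.1 (by rw [hA.1]; omega),
      pvPyGetD_getD _ false x hx.1 (by rw [hB.1]; omega)]
  rcases (hA.2 x.toNat hxN).2 with h0 | h1
  · have hnp : ¬ pvPrime x.toNat := fun hp => by
      have := (hA.2 x.toNat hxN).1.2 hp; omega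
    have hbf : (pvSieveB ((pvN lim : Nat) : Int)).getD x.toNat false = false := by
      rcases Bool.eq_false_or_eq_true ((pvSieveB ((pvN lim : Nat) : Int)).getD x.toNat false) with h | h
      · exact absurd ((hB.2 x.toNat hxN).1 h) hnp
      · exact h
    simp only [List.getD_eq_getElem?_getD] at h0 hbf
    simp [h0, hbf]
  · have hp : pvPrime x.toNat := (hA.2 x.toNat hxN).1.1 h1
    have hbt := (hB.2 x.toNat hxN).2 hp
    simp only [List.getD_eq_getElem?_getD] at h1 hbt
    simp [h1, hbt]

-- B's prefix list is the partial-sums list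
def pvPsums (a : Int) : List Int → List Int
  | [] => [a]
  | x :: xs => a :: pvPsums (a + x) xs

lemma pvPsums_length (a : Int) (xs : List Int) : (pvPsums a xs).length = xs.length + 1 := by
  induction xs generalizing a with
  | nil => rfl
  | cons x xs ih => simp [pvPsums, ih]

lemma pvPsums_getD_succ (a : Int) (xs : List Int) :
    ∀ k, k < xs.length →
      (pvPsums a xs).getD (k+1) 0 = (pvPsums a xs).getD k 0 + xs.getD k 0 := by
  induction xs generalizing a with
  | nil => intro k hk; simp at hk
  | cons x xs ih =>
    intro k hk
    cases k with
    | zero => cases xs <;> simp [pvPsums]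
    | succ k => simpa [pvPsums] using ih (a + x) k (by simpa using hk)

lemma pvPrefix_eq_psums (xs : List Int) :
    ∀ (ys : List Int) (a : Int),
      xs.foldl (fun pf p => pf ++ [PySem.List.pyGetD pf (-1) 0 + p]) (ys ++ [a]) = ys ++ pvPsums a xs := by
  induction xs with
  | nil => intro ys a; simp [pvPsums]
  | cons x xs ih =>
    intro ys a
    rw [List.foldl_cons, PySem.List.pyGetD_neg_one_append_singleton]
    have : ys ++ [a] ++ [a + x] = (ys ++ [a]) ++ [a + x] := by simp
    rw [this, ih (ys ++ [a]) (a + x)]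
    simp [pvPsums]

lemma pvPrefix_eq_psums' (xs : List Int) :
    xs.foldl (fun pf p => pf ++ [PySem.List.pyGetD pf (-1) 0 + p]) [0] = pvPsums 0 xs := by
  simpa using pvPrefix_eq_psums xs [] 0

lemma pvPsums_getD_mono (a : Int) (xs : List Int) (hx : ∀ x ∈ xs, 0 ≤ x) :
    ∀ k l, k ≤ l → l ≤ xs.length → (pvPsums a xs).getD k 0 ≤ (pvPsums a xs).getD l 0 := by
  intro k l hkl hl
  induction l with
  | zero =>
    have : k = 0 := by omega
    simp [this]
  | succ l ih =>
    by_cases h : k = l + 1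
    · simp [h]
    · have h1 : (pvPsums a xs).getD k 0 ≤ (pvPsums a xs).getD l 0 := ih (by omega) (by omega)
      have h2 := pvPsums_getD_succ a xs l (by omega)
      have h3 : 0 ≤ xs.getD l 0 := by
        rw [List.getD_eq_getElem xs 0 (by omega)]
        exact hx _ (List.getElem_mem _)
      omega

-- the two inner loops agree: A's running total is B's prefix difference, A's count is j-i-2
lemma pvInner_eq (lim : Int) (pm : List Int) (isp : List Bool) (primes : List Int)
    (hlim : 1 ≤ lim)
    (hpmlen : pm.length = pvN lim)
    (hisplen : isp.length = pvN lim)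
    (hpmchk : ∀ t : Nat, t < pvN lim → ((pm.getD t 0 = 1 ↔ pvPrime t) ∧ (pm.getD t 0 = 0 ∨ pm.getD t 0 = 1)))
    (hispchk : ∀ t : Nat, t < pvN lim → (isp.getD t false = true ↔ pvPrime t))
    (hnn : ∀ x ∈ primes, 0 ≤ x) :
    ∀ (fuel : Nat) (i p count total : Int) (st : List Int × List Int),
      0 ≤ i → i + 2 ≤ p → p ≤ (primes.length : Int) →
      total = (pvPsums 0 primes).getD p.toNat 0 - (pvPsums 0 primes).getD i.toNat 0 →
      count = p - i - 2 →
      pvInnerA lim pm primes fuel count total p st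
        = pvInnerB lim (PySem.List.len primes) isp (pvPsums 0 primes) i fuel p st := by
  intro fuel
  induction fuel with
  | zero => intros; rfl
  | succ fuel ih =>
    intro i p count total st h0i hip hpl htot hcnt
    have hlenP : (pvPsums 0 primes).length = primes.length + 1 := pvPsums_length 0 primes
    simp only [pvInnerA, pvInnerB, PySem.List.len_eq]
    by_cases hp : p < (primes.length : Int)
    · have hsB : PySem.List.pyGetD (pvPsums 0 primes) p 0 - PySem.List.pyGetD (pvPsums 0 primes) i 0 = total := by
        rw [pvPyGetD_getD _ 0 p (by omega) (by omega), pvPyGetD_getD _ 0 i h0i (by omega), htot]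
      rw [if_pos hp, hsB]
      by_cases hts : total < lim
      · rw [if_pos (show total < lim ∧ p < (primes.length:Int) from ⟨hts, hp⟩), if_neg (show ¬ lim ≤ total by omega)]
        have htnn : 0 ≤ total := by
          rw [htot]
          have := pvPsums_getD_mono 0 primes hnn i.toNat p.toNat (by omega) (by omega)
          omega
        have htN : total.toNat < pvN lim := by
          have := pvLim_le_N lim hlim; omega
        have hgpm : PySem.List.pyGetD pm total 0 = pm.getD total.toNat 0 := by
          rw [pvPyGetD_getD pm 0 total htnn (by rw [hpmlen]; omega)]
        have hgisp : PySem.List.pyGetD isp total false = isp.getD total.toNat false := by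
          rw [pvPyGetD_getD isp false total htnn (by rw [hisplen]; omega)]
        have hiff : (PySem.List.pyGetD pm total 0 = 1) ↔ (PySem.List.pyGetD isp total false = true) := by
          rw [hgpm, hgisp, (hpmchk total.toNat htN).1, hispchk total.toNat htN]
        have hgp : PySem.List.pyGetD primes p 0 = primes.getD p.toNat 0 := by
          rw [pvPyGetD_getD primes 0 p (by omega) (by omega)]
        have htot' : total + PySem.List.pyGetD primes p 0
            = (pvPsums 0 primes).getD (p+1).toNat 0 - (pvPsums 0 primes).getD i.toNat 0 := by
          have hstep := pvPsums_getD_succ 0 primes p.toNat (by omega)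
          have : (p+1).toNat = p.toNat + 1 := by omega
          rw [hgp, this, hstep]
          omega
        by_cases hchk : PySem.List.pyGetD pm total 0 = 1
        · rw [if_pos hchk, if_pos (hiff.1 hchk)]
          rw [show p - i - 2 = count from by omega]
          exact ih i (p+1) (count+1) _ _ h0i (by omega) (by omega) htot' (by omega)
        · rw [if_neg hchk, if_neg (fun hb => hchk (hiff.2 hb))]
          exact ih i (p+1) (count+1) _ _ h0i (by omega) (by omega) htot' (by omega)
      · rw [if_neg (show ¬ (total < lim ∧ p < (primes.length:Int)) by tauto), if_pos (show lim ≤ total by omega)]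
    · rw [if_neg (show ¬ (total < lim ∧ p < (primes.length:Int)) by tauto), if_neg hp]

theorem pvMain (lim : Int) (hlim : 1 ≤ lim) : P50 lim = P50_alt lim := by
  have hA := pvCreatePrimes_char lim hlim
  have hB := pvSieveB_char lim hlim
  simp only [P50, P50_alt]
  rw [pvPrimes_eq lim hlim]
  set primes := (PySem.List.pyRange 0 (if lim > 2 then lim else 2) 1).filter
      (fun k => PySem.List.pyGetD (pvSieveB (if lim > 2 then lim else 2)) k false) with hprimes
  rw [pvPrefix_eq_psums' primes]
  apply PySem.List.foldl_congr_mem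
  intro st i hi
  rw [PySem.List.mem_pyRange_one] at hi
  have hnn : ∀ x ∈ primes, 0 ≤ x := by
    intro x hx
    rw [hprimes] at hx
    have := (List.mem_filter.mp hx).1
    rw [PySem.List.mem_pyRange_one] at this
    omega
  have hlen2 : i + 2 ≤ (primes.length : Int) := by
    simp only [PySem.List.len_eq] at hi
    omega
  have hstep1 := pvPsums_getD_succ 0 primes i.toNat (by omega)
  have hstep2 := pvPsums_getD_succ 0 primes (i.toNat+1) (by omega)
  have hg1 : PySem.List.pyGetD primes i 0 = primes.getD i.toNat 0 :=
    pvPyGetD_getD primes 0 i (by omega) (by omega)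
  have hg2 : PySem.List.pyGetD primes (i+1) 0 = primes.getD (i.toNat+1) 0 := by
    rw [pvPyGetD_getD primes 0 (i+1) (by omega) (by omega)]
    congr 1
    omega
  have htot : PySem.List.pyGetD primes i 0 + PySem.List.pyGetD primes (i+1) 0
      = (pvPsums 0 primes).getD (i+2).toNat 0 - (pvPsums 0 primes).getD i.toNat 0 := by
    have : (i+2).toNat = i.toNat + 1 + 1 := by omega
    rw [hg1, hg2, this, hstep2, hstep1]
    ring
  exact pvInner_eq lim (pvCreatePrimes lim) (pvSieveB (if lim > 2 then lim else 2)) primes hlim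
    hA.1 hB.1 hA.2 hB.2 hnn
    ((PySem.List.len primes - (i+2)).toNat + 1) i (i+2) 0 _ st
    (by omega) (by omega) hlen2 htot (by omega)

-- ===== VERDICT (by name: the statement is the Claim_ definition above) =====
theorem P50_spec : Claim_equal_P50 := by
  intro lim _ hpre
  unfold Spec_P50
  exact pvMain lim hpre
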